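-- pv_equiv track=rewrite | github.com/HemaSundar53/Competetive-Programming- | Question Bank/Minimum Window Substring.py | check
-- ===== SOURCE A (Python) =====
-- def check(s,t):
--     d = {}
--     for i in s:
--         if i in d:
--             d[i]+=1
--         else:
--             d[i]=1
--     for i in t:
--         if i not in d or d[i]!=1:
--             return False
--     return True
-- ===== SOURCE B (Python) =====
-- def check(s, t):
--     # Sort s, sweep the sorted chars grouping equal runs, and collect into a set
--     # the characters whose run has length exactly 1; then t must draw only from that set.
--     cs = sorted(s)
--     once = set()
--     i, n = 0, len(cs)
--     while i < n:
--         j = i + 1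
--         while j < n and cs[j] == cs[i]:
--             j += 1
--         if j == i + 1:
--             once.add(cs[i])
--         i = j
--     return all(c in once for c in t)
-- ===== Notes on version B (the rewrite author's own statement) =====
-- stated objective: alternative
-- what changed: Replaced A's hash-table counting (build a frequency dict of s, then look each char of t up) by sort-then-sweep: sort s, scan the sorted chars once grouping equal runs, collect run-length-1 characters into a set, and test t against that set; no frequency table exists.
import Mathlib
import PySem

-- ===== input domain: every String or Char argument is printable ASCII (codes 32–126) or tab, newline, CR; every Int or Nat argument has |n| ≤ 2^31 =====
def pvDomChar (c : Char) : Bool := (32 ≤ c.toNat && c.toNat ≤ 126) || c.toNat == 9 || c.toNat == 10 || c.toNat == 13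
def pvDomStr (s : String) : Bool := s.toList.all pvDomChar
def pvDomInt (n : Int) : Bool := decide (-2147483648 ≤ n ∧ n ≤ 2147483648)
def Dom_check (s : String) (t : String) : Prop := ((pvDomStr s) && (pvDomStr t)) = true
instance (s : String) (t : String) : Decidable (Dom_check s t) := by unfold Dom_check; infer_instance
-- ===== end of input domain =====

-- B replaces A's frequency-dict counting by sort-then-sweep: sort s, group equal runs in one
-- scan, collect the run-length-1 characters into a set, and test t against that set (alternative).

-- ===== PORT A =====
-- A's second loop with its early 'return False'
def checkLoopA (d : PySem.Dict Char Int) : List Char → Bool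
  | [] => true
  | i :: rest => if !d.contains i || d.getD i 0 != 1 then false else checkLoopA d rest

def check (s : String) (t : String) : Bool :=
  let d := s.toList.foldl
    (fun d i => if d.contains i then d.modify i 0 (· + 1) else d.insert i 1)
    PySem.Dict.empty
  checkLoopA d t.toList

-- ===== PORT B =====
-- the outer while-loop of Source B: each step consumes one run of equal chars
-- (the inner 'while j' is the takeWhile/dropWhile split) and adds the char if the run is a singleton
def uniqSweep (acc : PySem.Set Char) : List Char → PySem.Set Char
  | [] => acc
  | c :: rest =>
      uniqSweep (if rest.takeWhile (· == c) = [] then PySem.Set.add acc c else acc)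
        (rest.dropWhile (· == c))
termination_by l => l.length
decreasing_by
  simp only [List.length_cons]
  exact Nat.lt_succ_of_le (List.length_dropWhile_le _ _)

def check_alt (s : String) (t : String) : Bool :=
  let once := uniqSweep PySem.Set.empty (PySem.List.sorted s.toList (fun x => x) false)
  t.toList.all (fun c => PySem.Set.contains once c)

-- ===== PRECONDITION & SPEC =====
def Spec_check (s : String) (t : String) (out : Bool) : Prop := out = check_alt s t
instance (s : String) (t : String) (out : Bool) : Decidable (Spec_check s t out) := by unfold Spec_check; infer_instance

-- ===== CLAIM =====
def Claim_equal_check : Prop := ∀ (s : String) (t : String), Dom_check s t → Spec_check s t (check s t)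

-- ===== LEMMAS AND PROOFS =====

-- A's counting step is exactly Counter's step
theorem stepA_eq_modify (d : PySem.Dict Char Int) (i : Char) :
    (if d.contains i then d.modify i 0 (· + 1) else d.insert i 1) = d.modify i 0 (· + 1) := by
  by_cases h : d.contains i
  · simp [h]
  · simp [h, PySem.Dict.modify, PySem.Dict.getD,
      (PySem.Dict.get?_eq_none_iff_contains d i).mpr (by simp [h])]

theorem foldA_eq_counter (xs : List Char) :
    xs.foldl (fun d i => if d.contains i then d.modify i 0 (· + 1) else d.insert i 1)
      PySem.Dict.empty = PySem.Dict.counter xs := by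
  rw [PySem.Dict.counter_eq_foldl]
  simp only [stepA_eq_modify]

theorem checkLoopA_eq_all (d : PySem.Dict Char Int) (l : List Char) :
    checkLoopA d l = l.all (fun i => d.contains i && d.getD i 0 == 1) := by
  induction l with
  | nil => rfl
  | cons i rest ih =>
    simp only [checkLoopA, List.all_cons, ih]
    by_cases h1 : d.contains i <;> by_cases h2 : d.getD i 0 = 1 <;>
      simp [h1, h2]

-- on a (≤)-sorted list, the char heading a run does not reappear after the run is dropped
theorem not_mem_dropWhile_of_sorted (c : Char) (rest : List Char)
    (hle : ∀ y ∈ rest, c ≤ y) (hp : rest.Pairwise (· ≤ ·)) :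
    c ∉ rest.dropWhile (· == c) := by
  intro hmem
  have hsub : (rest.dropWhile (· == c)).Sublist rest := List.dropWhile_sublist _
  cases hdw : rest.dropWhile (· == c) with
  | nil => rw [hdw] at hmem; exact absurd hmem (List.not_mem_nil)
  | cons d ds =>
    have hdne : ¬ (d == c) = true := by
      have := List.head_dropWhile_not (· == c) (l := rest) (by rw [hdw]; simp)
      simpa [hdw] using this
    have hdc : d ≠ c := by simpa using hdne
    have hdmem : d ∈ rest := hsub.subset (by rw [hdw]; exact List.mem_cons_self)
    have hcd : c ≤ d := hle d hdmem
    have hpdw : (d :: ds).Pairwise (· ≤ ·) := hdw ▸ hp.sublist hsub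
    rw [hdw] at hmem
    rcases List.mem_cons.mp hmem with h | h
    · exact hdc h.symm
    · have : d ≤ c := (List.pairwise_cons.mp hpdw).1 c h
      exact hdc (le_antisymm this hcd)

-- count of the run head: 1 + length of the run's tail
theorem count_head_sorted (c : Char) (rest : List Char)
    (hle : ∀ y ∈ rest, c ≤ y) (hp : rest.Pairwise (· ≤ ·)) :
    (c :: rest).count c = 1 + (rest.takeWhile (· == c)).length := by
  have hsplit : rest.takeWhile (· == c) ++ rest.dropWhile (· == c) = rest :=
    List.takeWhile_append_dropWhile
  have h0 : (rest.dropWhile (· == c)).count c = 0 :=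
    List.count_eq_zero_of_not_mem (not_mem_dropWhile_of_sorted c rest hle hp)
  have htk : (rest.takeWhile (· == c)).count c = (rest.takeWhile (· == c)).length := by
    refine List.count_eq_length.mpr (fun y hy => ?_)
    have := List.mem_takeWhile_imp (l := rest) (p := (· == c)) hy
    exact (beq_iff_eq.mp this).symm
  have hrest : rest.count c = (rest.takeWhile (· == c)).length := by
    conv_lhs => rw [← hsplit]
    rw [List.count_append, h0, htk]
    omega
  rw [List.count_cons_self, hrest]
  omega

-- count of a different char passes through the dropped run
theorem count_ne_sorted (c x : Char) (rest : List Char) (hne : x ≠ c) :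
    (c :: rest).count x = (rest.dropWhile (· == c)).count x := by
  have hsplit : rest.takeWhile (· == c) ++ rest.dropWhile (· == c) = rest :=
    List.takeWhile_append_dropWhile
  have htk : (rest.takeWhile (· == c)).count x = 0 := by
    apply List.count_eq_zero_of_not_mem
    intro hmem
    have := List.mem_takeWhile_imp hmem
    exact hne (by simpa using this)
  have hrest : rest.count x = (rest.dropWhile (· == c)).count x := by
    conv_lhs => rw [← hsplit]
    rw [List.count_append, htk]
    omega
  rw [List.count_cons_of_ne (Ne.symm hne), hrest]

-- sweep invariant: membership in the result = already collected, or count exactly 1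
theorem mem_uniqSweep : ∀ (n : Nat) (l : List Char), l.length ≤ n → l.Pairwise (· ≤ ·) →
    ∀ (acc : PySem.Set Char) (x : Char), x ∈ uniqSweep acc l ↔ x ∈ acc ∨ l.count x = 1 := by
  intro n
  induction n with
  | zero => intro l hlen _ acc x; rw [List.length_eq_zero_iff.mp (Nat.le_zero.mp hlen)]
            simp [uniqSweep]
  | succ m ih =>
    intro l hlen hp acc x
    cases l with
    | nil => simp [uniqSweep]
    | cons c rest =>
      have hle : ∀ y ∈ rest, c ≤ y := (List.pairwise_cons.mp hp).1
      have hpr : rest.Pairwise (· ≤ ·) := (List.pairwise_cons.mp hp).2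
      have hpd : (rest.dropWhile (· == c)).Pairwise (· ≤ ·) :=
        hpr.sublist (List.dropWhile_sublist _)
      have hld : (rest.dropWhile (· == c)).length ≤ m := by
        have := List.length_dropWhile_le (· == c) rest
        simp at hlen; omega
      rw [uniqSweep, ih _ hld hpd]
      have hcnt0 : (rest.dropWhile (· == c)).count c = 0 :=
        List.count_eq_zero_of_not_mem (not_mem_dropWhile_of_sorted c rest hle hpr)
      by_cases hx : x = c
      · subst hx
        rw [count_head_sorted x rest hle hpr, hcnt0]
        by_cases htw : rest.takeWhile (· == x) = []
        · simp [htw, PySem.Set.mem_add]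
        · have : (rest.takeWhile (· == x)).length ≠ 0 := by
            simpa [List.length_eq_zero_iff] using htw
          simp only [htw, if_false]
          constructor
          · rintro (h | h)
            · exact Or.inl h
            · omega
          · rintro (h | h)
            · exact Or.inl h
            · omega
      · rw [← count_ne_sorted c x rest hx]
        by_cases htw : rest.takeWhile (· == c) = [] <;>
          simp [htw, PySem.Set.mem_add, hx]

-- ===== VERDICT =====
theorem check_spec : Claim_equal_check := by
  intro s t _
  unfold Spec_check check check_alt
  simp only [foldA_eq_counter, checkLoopA_eq_all]
  congr 1
  funext c
  have hperm : (PySem.List.sorted s.toList (fun x => x) false).Perm s.toList :=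
    PySem.List.sorted_perm _ _ _
  have hpair : (PySem.List.sorted s.toList (fun x => x) false).Pairwise (· ≤ ·) := by
    simpa using PySem.List.sorted_pairwise (xs := s.toList) (key := fun x => x)
  have hmem := mem_uniqSweep _ _ le_rfl hpair PySem.Set.empty c
  have hcount : (PySem.List.sorted s.toList (fun x => x) false).count c = s.toList.count c :=
    hperm.count_eq c
  rw [PySem.Dict.getD_counter]
  apply Bool.eq_iff_iff.mpr
  rw [PySem.Set.contains_iff, hmem, hcount]
  simp only [PySem.Set.empty, List.not_mem_nil, false_or, Bool.and_eq_true, beq_iff_eq,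
    PySem.Dict.contains_counter, Nat.cast_eq_one]
  constructor
  · rintro ⟨-, h2⟩; exact h2
  · intro h; exact ⟨by simp [List.count_pos_iff.symm, h], h⟩
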